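-- pv_equiv track=rewrite | github.com/yuhangear/change | examples/gigaspeech/s0/wenet/bin/word_alignment.py | get_frames_timestamp_word
-- ===== SOURCE A (Python) =====
-- def get_frames_timestamp_word(alignment,mid_token):
--     # convert alignment to a praat format, which is a doing phonetics
--     # by computer and helps analyzing alignment
--     timestamp = []
--     # get frames level duration for each token
--     start = 0
--     end = 0
--     while end < len(alignment):
--         while end < len(alignment) and alignment[end] == 0:
--             end += 1
--         if end == len(alignment):
--             timestamp[-1] += alignment[start:]
--             break
--         end += 1
--         while end < len(alignment) and alignment[end - 1] == alignment[end]: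
--             end += 1
--         timestamp.append(alignment[start:end])
--         start = end
--     timestamp_new=[]
--     for i in timestamp[:-1]:
--         i=i.copy()
--         if i[-1] not in mid_token :
--             timestamp_new.append(i)
--         else:
--             timestamp_new[-1].extend(i)
--
--
--
--     last=max(timestamp[-1])
--
--     i=timestamp[-1].copy()
--     if  last not in mid_token :
--         timestamp_new.append(i)
--     else:
--         timestamp_new[-1].extend(i)
--     # timestamp
--     return timestamp_new
-- ===== SOURCE B (Python) =====
-- def get_frames_timestamp_word(alignment, mid_token):
--     # Group alignment into maximal runs of equal values (one pass),
--     # pair each zero-run with the token-run that follows it, folding a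
--     # trailing zero-run into the last segment, then merge mid-token
--     # segments into their predecessor.
--     runs = []
--     for x in alignment:
--         if runs and runs[-1][0] == x:
--             runs[-1].append(x)
--         else:
--             runs.append([x])
--
--     segments = []
--     idx = 0
--     while idx < len(runs):
--         run = runs[idx]
--         if run[0] == 0:
--             if idx + 1 < len(runs):
--                 segments.append(run + runs[idx + 1])
--                 idx += 2
--             else:
--                 segments[-1] = segments[-1] + run
--                 idx += 1
--         else:
--             segments.append(run)
--             idx += 1
--
--     result = []
--     for k, seg in enumerate(segments):
--         key = max(seg) if k == len(segments) - 1 else seg[-1]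
--         if key in mid_token:
--             result[-1] = result[-1] + seg
--         else:
--             result.append(seg)
--     return result
-- ===== Notes on version B (the rewrite author's own statement) =====
-- stated objective: alternative
-- what changed: Replaces A's index-chasing nested while loops and slice extraction by a single pass that groups the list into maximal equal-value runs, then assembles segments by pairing each zero-run with the following token-run (folding a trailing zero-run into the last segment) and merges mid-token segments into their predecessor.
import Mathlib
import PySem

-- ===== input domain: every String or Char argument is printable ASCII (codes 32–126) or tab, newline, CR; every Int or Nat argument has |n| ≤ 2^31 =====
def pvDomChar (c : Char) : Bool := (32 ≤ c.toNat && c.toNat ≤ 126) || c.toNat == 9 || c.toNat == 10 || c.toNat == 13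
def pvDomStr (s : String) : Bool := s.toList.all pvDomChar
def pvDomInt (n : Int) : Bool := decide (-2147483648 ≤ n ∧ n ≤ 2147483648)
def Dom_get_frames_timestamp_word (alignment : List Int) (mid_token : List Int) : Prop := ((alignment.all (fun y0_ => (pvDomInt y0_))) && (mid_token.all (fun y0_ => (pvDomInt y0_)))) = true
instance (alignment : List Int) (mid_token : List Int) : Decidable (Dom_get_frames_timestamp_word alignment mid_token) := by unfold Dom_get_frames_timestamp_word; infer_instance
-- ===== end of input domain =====

-- B re-groups the list into maximal equal-value runs in one pass and assembles
-- segments from the runs, instead of A's index-chasing nested while loops;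
-- same cost, stated objective: alternative algorithm/data structure.
-- Where Python indexes the last element of an empty list (IndexError, outside
-- Pre_), both ports use the total stand-in `l.dropLast ++ [l.getLastD [] ++ _]`.

-- ===== PORT A =====
-- inner `while end < len(alignment) and alignment[end] == 0: end += 1`
def pyA_skip0 (a : List Int) (e : Nat) : Nat :=
  if _h : e < a.length then
    if a.getD e 0 = 0 then pyA_skip0 a (e + 1) else e
  else e
termination_by a.length - e

-- inner `while end < len(alignment) and alignment[end-1] == alignment[end]: end += 1`
def pyA_run (a : List Int) (e : Nat) : Nat :=
  if _h : e < a.length then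
    if a.getD (e - 1) 0 = a.getD e 0 then pyA_run a (e + 1) else e
  else e
termination_by a.length - e

theorem pyA_skip0_le (a : List Int) (e : Nat) : e ≤ pyA_skip0 a e := by
  unfold pyA_skip0
  split
  · split
    · exact Nat.le_trans (Nat.le_succ e) (pyA_skip0_le a (e + 1))
    · exact Nat.le_refl e
  · exact Nat.le_refl e
termination_by a.length - e

theorem pyA_run_le (a : List Int) (e : Nat) : e ≤ pyA_run a e := by
  unfold pyA_run
  split
  · split
    · exact Nat.le_trans (Nat.le_succ e) (pyA_run_le a (e + 1))
    · exact Nat.le_refl e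
  · exact Nat.le_refl e
termination_by a.length - e

-- outer while loop; state (start, end, timestamp); alignment[start:end] for
-- 0 ≤ start ≤ end ≤ len is exactly (a.drop start).take (end - start)
def pyA_outer (a : List Int) (start e : Nat) (ts : List (List Int)) : List (List Int) :=
  if _h : e < a.length then
    let e1 := pyA_skip0 a e
    if _h2 : e1 = a.length then
      -- timestamp[-1] += alignment[start:]  (IndexError on empty ts: outside Pre_)
      ts.dropLast ++ [ts.getLastD [] ++ a.drop start]
    else
      let e2 := pyA_run a (e1 + 1)
      pyA_outer a e2 e2 (ts ++ [(a.drop start).take (e2 - start)])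
  else ts
termination_by a.length - e
decreasing_by
  have h1 : e ≤ pyA_skip0 a e := pyA_skip0_le a e
  have h2 : pyA_skip0 a e + 1 ≤ pyA_run a (pyA_skip0 a e + 1) := pyA_run_le a (pyA_skip0 a e + 1)
  omega

-- `for i in timestamp[:-1]` body
def pyA_step (mid : List Int) (acc : List (List Int)) (i : List Int) : List (List Int) :=
  if mid.contains (i.getLastD 0) then acc.dropLast ++ [acc.getLastD [] ++ i]
  else acc ++ [i]

def get_frames_timestamp_word (alignment : List Int) (mid_token : List Int) : List (List Int) :=
  let timestamp := pyA_outer alignment 0 0 []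
  let tn := timestamp.dropLast.foldl (pyA_step mid_token) []
  let lastSeg := timestamp.getLastD []
  -- last = max(timestamp[-1])  (IndexError on empty: outside Pre_, stand-in 0)
  let last := (PySem.List.max? lastSeg (fun x => x)).getD 0
  if mid_token.contains last then tn.dropLast ++ [tn.getLastD [] ++ lastSeg]
  else tn ++ [lastSeg]

-- ===== PORT B =====
-- `for x in alignment:` building maximal equal runs (runs[-1][0] == x check)
def pyB_runs (a : List Int) : List (List Int) :=
  a.foldl
    (fun rs x =>
      match rs.getLast? with
      | some r => if r.headD 0 = x then rs.dropLast ++ [r ++ [x]] else rs ++ [[x]]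
      | none => [[x]])
    []

-- `while idx < len(runs):` consuming runs into segments
def pyB_segs (segs : List (List Int)) : List (List Int) → List (List Int)
  | [] => segs
  | r :: rest =>
    if r.headD 0 = 0 then
      match rest with
      | r2 :: rest2 => pyB_segs (segs ++ [r ++ r2]) rest2
      | [] => segs.dropLast ++ [segs.getLastD [] ++ r]
    else pyB_segs (segs ++ [r]) rest

-- `for k, seg in enumerate(segments):` with key = max(seg) on the last segment
def pyB_merge (mid : List Int) (res : List (List Int)) : List (List Int) → List (List Int)
  | [] => res
  | [seg] =>
    if mid.contains ((PySem.List.max? seg (fun x => x)).getD 0) then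
      res.dropLast ++ [res.getLastD [] ++ seg]
    else res ++ [seg]
  | seg :: rest =>
    if mid.contains (seg.getLastD 0) then
      pyB_merge mid (res.dropLast ++ [res.getLastD [] ++ seg]) rest
    else pyB_merge mid (res ++ [seg]) rest

def get_frames_timestamp_word_alt (alignment : List Int) (mid_token : List Int) : List (List Int) :=
  pyB_merge mid_token [] (pyB_segs [] (pyB_runs alignment))

-- ===== PRECONDITION & SPEC =====
-- Pre_ excludes exactly the inputs where Python A raises IndexError: alignment
-- with no nonzero frame (empty timestamp), and inputs whose FIRST segment's
-- merge key (its token, or max(alignment) when it is the only segment) is in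
-- mid_token, where A extends timestamp_new[-1] of an empty timestamp_new.
def Pre_get_frames_timestamp_word (alignment : List Int) (mid_token : List Int) : Prop :=
  (∃ x ∈ alignment, x ≠ 0) ∧
  (let t := alignment.dropWhile (fun x => x == 0)
   let v := t.headD 0
   let key := if (t.dropWhile (fun x => x == v)).any (fun y => y ≠ 0) then v
              else (PySem.List.max? alignment (fun x => x)).getD 0
   ¬ mid_token.contains key)
instance (alignment : List Int) (mid_token : List Int) : Decidable (Pre_get_frames_timestamp_word alignment mid_token) := by unfold Pre_get_frames_timestamp_word; infer_instance

def pvWitness_get_frames_timestamp_word : List Int × List Int := ([0, 5, 5, 3, 0], [3])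

def Spec_get_frames_timestamp_word (alignment : List Int) (mid_token : List Int) (out : List (List Int)) : Prop := out = get_frames_timestamp_word_alt alignment mid_token
instance (alignment : List Int) (mid_token : List Int) (out : List (List Int)) : Decidable (Spec_get_frames_timestamp_word alignment mid_token out) := by unfold Spec_get_frames_timestamp_word; infer_instance

-- ===== CLAIM =====
def Claim_equal_get_frames_timestamp_word : Prop := ∀ (alignment : List Int) (mid_token : List Int), Dom_get_frames_timestamp_word alignment mid_token → Pre_get_frames_timestamp_word alignment mid_token → Spec_get_frames_timestamp_word alignment mid_token (get_frames_timestamp_word alignment mid_token)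


-- ===== LEMMAS AND PROOFS =====

-- maximal equal-value runs, recursively (bridge between the two ports)
def groupRuns : List Int → List (List Int)
  | [] => []
  | x :: xs => (x :: xs.takeWhile (fun y => y == x)) :: groupRuns (xs.dropWhile (fun y => y == x))
termination_by l => l.length
decreasing_by
  simp only [List.length_cons]
  exact Nat.lt_succ_of_le (List.dropWhile_sublist _).length_le

def bRunsFrom (r : List Int) : List Int → List (List Int)
  | [] => [r]
  | x :: xs => if r.headD 0 = x then bRunsFrom (r ++ [x]) xs else r :: bRunsFrom [x] xs

theorem dropWhile_eq_drop (p : Int → Bool) (l : List Int) :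
    l.dropWhile p = l.drop (l.takeWhile p).length := by
  induction l with
  | nil => simp
  | cons x xs ih => by_cases h : p x <;> simp [List.dropWhile_cons, List.takeWhile_cons, h, ih]

theorem bRunsFrom_eq (l : List Int) : ∀ (r : List Int) (v : Int), r ≠ [] → r.headD 0 = v →
    bRunsFrom r l = (r ++ l.takeWhile (fun y => y == v)) :: groupRuns (l.dropWhile (fun y => y == v)) := by
  induction l with
  | nil => intro r v _ _; simp [bRunsFrom, groupRuns]
  | cons x xs ih =>
    intro r v hr hv
    obtain ⟨hd, tl, rfl⟩ := List.exists_cons_of_ne_nil hr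
    simp only [List.headD_cons] at hv
    subst hv
    by_cases hx : hd = x
    · subst hx
      simp only [bRunsFrom, List.headD_cons, if_pos rfl]
      rw [ih (hd :: tl ++ [hd]) hd (by simp) (by simp)]
      simp [List.takeWhile_cons, List.dropWhile_cons]
    · simp only [bRunsFrom, List.headD_cons, if_neg hx]
      rw [ih [x] x (by simp) (by simp)]
      have hbx : (x == hd) = false := by simp [bne_iff_ne]; exact fun h => hx h.symm
      simp [groupRuns, List.takeWhile_cons, List.dropWhile_cons, hbx]

theorem runs_foldl (l : List Int) : ∀ (init : List (List Int)) (r : List Int),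
    List.foldl
      (fun rs x =>
        match rs.getLast? with
        | some r' => if r'.headD 0 = x then rs.dropLast ++ [r' ++ [x]] else rs ++ [[x]]
        | none => [[x]])
      (init ++ [r]) l = init ++ bRunsFrom r l := by
  induction l with
  | nil => intro init r; simp [bRunsFrom]
  | cons x xs ih =>
    intro init r
    simp only [List.foldl_cons, List.getLast?_concat, List.dropLast_concat, bRunsFrom]
    by_cases h : r.headD 0 = x
    · rw [if_pos h, ih init (r ++ [x]), if_pos h]
    · rw [if_neg h, if_neg h, ih (init ++ [r]) [x]]
      simp

theorem pyB_runs_eq (a : List Int) : pyB_runs a = groupRuns a := by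
  cases a with
  | nil => simp [pyB_runs, groupRuns]
  | cons x xs =>
    unfold pyB_runs
    simp only [List.foldl_cons, List.getLast?_nil]
    have h0 : (List.foldl (fun rs x =>
        match rs.getLast? with
        | some r' => if r'.headD 0 = x then rs.dropLast ++ [r' ++ [x]] else rs ++ [[x]]
        | none => [[x]]) ([[x]]) xs) = [] ++ bRunsFrom [x] xs := runs_foldl xs [] [x]
    simp only [List.nil_append] at h0
    rw [h0, bRunsFrom_eq xs [x] x (by simp) (by simp)]
    simp [groupRuns]

theorem pyA_skip0_eq (a : List Int) (e : Nat) :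
    pyA_skip0 a e = e + ((a.drop e).takeWhile (fun y => y == 0)).length := by
  unfold pyA_skip0
  split
  · rename_i h
    rw [List.drop_eq_getElem_cons h, List.getD_eq_getElem a 0 h]
    split
    · rename_i h0
      rw [pyA_skip0_eq a (e + 1)]
      simp [List.takeWhile_cons, h0]
      omega
    · rename_i h0
      simp [List.takeWhile_cons, h0]
  · rename_i h
    rw [List.drop_eq_nil_of_le (by omega)]
    simp
termination_by a.length - e

theorem pyA_run_eq (a : List Int) (e : Nat) (v : Int) (hv : a.getD (e - 1) 0 = v) :
    pyA_run a e = e + ((a.drop e).takeWhile (fun y => y == v)).length := by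
  unfold pyA_run
  split
  · rename_i h
    rw [List.drop_eq_getElem_cons h, List.getD_eq_getElem a 0 h, hv]
    split
    · rename_i h0
      have hb : (a[e] == v) = true := by simp [beq_iff_eq]; exact h0.symm
      rw [pyA_run_eq a (e + 1) v (by rw [Nat.add_sub_cancel, List.getD_eq_getElem a 0 h]; exact h0.symm)]
      rw [List.takeWhile_cons, hb]
      simp only [if_true, List.length_cons]
      omega
    · rename_i h0
      have hb : (a[e] == v) = false := by simp [beq_iff_eq]; exact fun hh => h0 hh.symm
      rw [List.takeWhile_cons, hb]
      simp
  · rename_i h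
    rw [List.drop_eq_nil_of_le (by omega)]
    simp
termination_by a.length - e

theorem groupRuns_cons (x : Int) (l : List Int) (hx : l.head? = some x) :
    groupRuns l = (l.takeWhile (fun y => y == x)) :: groupRuns (l.dropWhile (fun y => y == x)) := by
  cases l with
  | nil => simp at hx
  | cons z zs =>
    simp only [List.head?_cons, Option.some.injEq] at hx
    subst hx
    simp [groupRuns, List.takeWhile_cons, List.dropWhile_cons]

theorem dropWhile_drop_eq (p : Int → Bool) (a : List Int) (s : Nat) :
    (a.drop s).dropWhile p = a.drop (s + ((a.drop s).takeWhile p).length) := by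
  rw [dropWhile_eq_drop, List.drop_drop]

theorem groupRuns_drop_run (a : List Int) (e1 : Nat) (h : e1 < a.length) :
    groupRuns (a.drop e1) =
      (a[e1] :: (a.drop (e1 + 1)).takeWhile (fun y => y == a[e1])) ::
        groupRuns (a.drop (e1 + 1 + ((a.drop (e1 + 1)).takeWhile (fun y => y == a[e1])).length)) := by
  rw [List.drop_eq_getElem_cons h, groupRuns]
  congr 1
  rw [dropWhile_eq_drop, List.drop_drop]

theorem pyB_segs_cons_ne (segs : List (List Int)) (r : List Int) (rest : List (List Int))
    (hr : ¬ r.headD 0 = 0) : pyB_segs segs (r :: rest) = pyB_segs (segs ++ [r]) rest := by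
  cases rest with
  | nil => rw [pyB_segs.eq_3, if_neg hr]
  | cons r2 rest2 => rw [pyB_segs.eq_2, if_neg hr]

theorem pyB_segs_cons0 (segs : List (List Int)) (r r2 : List Int) (rest2 : List (List Int))
    (hr : r.headD 0 = 0) : pyB_segs segs (r :: r2 :: rest2) = pyB_segs (segs ++ [r ++ r2]) rest2 := by
  rw [pyB_segs.eq_2, if_pos hr]

theorem take_run (z : List Int) (v : Int) (w rest : List Int) :
    (z ++ v :: (w ++ rest)).take (z.length + 1 + w.length) = z ++ v :: w := by
  rw [List.take_append, List.take_of_length_le (by omega)]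
  congr 1
  have h1 : z.length + 1 + w.length - z.length = w.length + 1 := by omega
  rw [h1, List.take_succ_cons]
  congr 1
  exact (List.prefix_iff_eq_take.mp ⟨rest, rfl⟩).symm

theorem pyA_outer_eq (a : List Int) (n : Nat) : ∀ (s : Nat) (ts : List (List Int)),
    a.length - s ≤ n → pyA_outer a s s ts = pyB_segs ts (groupRuns (a.drop s)) := by
  induction n with
  | zero =>
    intro s ts hn
    unfold pyA_outer
    rw [dif_neg (by omega)]
    rw [List.drop_eq_nil_of_le (by omega)]
    simp [groupRuns, pyB_segs]
  | succ n ih =>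
    intro s ts hn
    by_cases h : s < a.length
    · have hskip := pyA_skip0_eq a s
      have hzle : ((a.drop s).takeWhile (fun y => y == 0)).length ≤ (a.drop s).length :=
        (List.takeWhile_prefix _).length_le
      have hdlen : (a.drop s).length = a.length - s := List.length_drop
      unfold pyA_outer
      rw [dif_pos h]
      simp only [hskip]
      by_cases h2 : s + ((a.drop s).takeWhile (fun y => y == 0)).length = a.length
      · -- trailing / all-zero suffix: the whole of drop s is one zero run
        rw [dif_pos h2]
        have hzfull : (a.drop s).takeWhile (fun y => y == 0) = a.drop s :=
          (List.takeWhile_prefix _).eq_of_length (by omega)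
        have hall : ∀ y ∈ a.drop s, (y == 0) = true := List.takeWhile_eq_self_iff.mp hzfull
        obtain ⟨x, xs, hds⟩ := List.exists_cons_of_ne_nil
          (show a.drop s ≠ [] by
            intro hnil; rw [hnil] at hdlen; simp at hdlen; omega)
        have hx0 : x = 0 := by
          have := hall x (by rw [hds]; exact List.mem_cons_self)
          simpa using this
        have hxs : ∀ y ∈ xs, (y == 0) = true := by
          intro y hy; exact hall y (by rw [hds]; exact List.mem_cons_of_mem _ hy)
        have hgr : groupRuns (a.drop s) = [a.drop s] := by
          rw [hds, groupRuns, hx0]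
          rw [List.takeWhile_eq_self_iff.mpr hxs]
          rw [List.dropWhile_eq_nil_iff.mpr hxs]
          simp [groupRuns]
        rw [hgr, hds]
        simp [pyB_segs, hx0]
      · rw [dif_neg h2]
        -- the first token of the suffix sits at index e1 = s + (zero run).length
        have he1 : s + ((a.drop s).takeWhile (fun y => y == 0)).length < a.length := by omega
        have hdw : (a.drop s).dropWhile (fun y => y == 0)
            = a.drop (s + ((a.drop s).takeWhile (fun y => y == 0)).length) :=
          dropWhile_drop_eq _ a s
        have hd1 : a.drop (s + ((a.drop s).takeWhile (fun y => y == 0)).length)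
            = a[s + ((a.drop s).takeWhile (fun y => y == 0)).length]
              :: a.drop (s + ((a.drop s).takeWhile (fun y => y == 0)).length + 1) :=
          List.drop_eq_getElem_cons he1
        have hne : (a.drop s).dropWhile (fun y => y == 0) ≠ [] := by
          rw [hdw, hd1]; exact List.cons_ne_nil _ _
        have hv0 : (a[s + ((a.drop s).takeWhile (fun y => y == 0)).length] == 0) = false := by
          have hhd := List.head_dropWhile_not (fun y => y == 0) hne
          rwa [(List.head_eq_iff_head?_eq_some hne).mpr (by rw [hdw, hd1]; rfl)] at hhd
        have hrun := pyA_run_eq a (s + ((a.drop s).takeWhile (fun y => y == 0)).length + 1)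
          (a[s + ((a.drop s).takeWhile (fun y => y == 0)).length])
          (by rw [Nat.add_sub_cancel]; exact List.getD_eq_getElem a 0 he1)
        rw [hrun]
        have hsplit : a.drop s
            = (a.drop s).takeWhile (fun y => y == 0)
              ++ a[s + ((a.drop s).takeWhile (fun y => y == 0)).length]
                 :: ((a.drop (s + ((a.drop s).takeWhile (fun y => y == 0)).length + 1)).takeWhile
                      (fun y => y == a[s + ((a.drop s).takeWhile (fun y => y == 0)).length])
                    ++ (a.drop (s + ((a.drop s).takeWhile (fun y => y == 0)).length + 1)).dropWhile
                      (fun y => y == a[s + ((a.drop s).takeWhile (fun y => y == 0)).length])) := by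
          conv_lhs => rw [← List.takeWhile_append_dropWhile
            (p := fun y => y == 0) (l := a.drop s)]
          rw [hdw, hd1]
          congr 2
          exact (List.takeWhile_append_dropWhile).symm
        have hseg : (a.drop s).take
              (((a.drop s).takeWhile (fun y => y == 0)).length + 1
                + ((a.drop (s + ((a.drop s).takeWhile (fun y => y == 0)).length + 1)).takeWhile
                    (fun y => y == a[s + ((a.drop s).takeWhile (fun y => y == 0)).length])).length)
            = (a.drop s).takeWhile (fun y => y == 0)
              ++ a[s + ((a.drop s).takeWhile (fun y => y == 0)).length]
                 :: (a.drop (s + ((a.drop s).takeWhile (fun y => y == 0)).length + 1)).takeWhile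
                      (fun y => y == a[s + ((a.drop s).takeWhile (fun y => y == 0)).length]) := by
          have ht := take_run
            ((a.drop s).takeWhile (fun y => y == 0))
            (a[s + ((a.drop s).takeWhile (fun y => y == 0)).length])
            ((a.drop (s + ((a.drop s).takeWhile (fun y => y == 0)).length + 1)).takeWhile
              (fun y => y == a[s + ((a.drop s).takeWhile (fun y => y == 0)).length]))
            ((a.drop (s + ((a.drop s).takeWhile (fun y => y == 0)).length + 1)).dropWhile
              (fun y => y == a[s + ((a.drop s).takeWhile (fun y => y == 0)).length]))
          rw [← hsplit] at ht
          exact ht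
        have hfinal : (a.drop s).take
              (s + ((a.drop s).takeWhile (fun y => y == 0)).length + 1
                + ((a.drop (s + ((a.drop s).takeWhile (fun y => y == 0)).length + 1)).takeWhile
                    (fun y => y == a[s + ((a.drop s).takeWhile (fun y => y == 0)).length])).length
                - s)
            = (a.drop s).takeWhile (fun y => y == 0)
              ++ a[s + ((a.drop s).takeWhile (fun y => y == 0)).length]
                 :: (a.drop (s + ((a.drop s).takeWhile (fun y => y == 0)).length + 1)).takeWhile
                      (fun y => y == a[s + ((a.drop s).takeWhile (fun y => y == 0)).length]) := by
          rw [show s + ((a.drop s).takeWhile (fun y => y == 0)).length + 1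
                + ((a.drop (s + ((a.drop s).takeWhile (fun y => y == 0)).length + 1)).takeWhile
                    (fun y => y == a[s + ((a.drop s).takeWhile (fun y => y == 0)).length])).length
                - s
              = ((a.drop s).takeWhile (fun y => y == 0)).length + 1
                + ((a.drop (s + ((a.drop s).takeWhile (fun y => y == 0)).length + 1)).takeWhile
                    (fun y => y == a[s + ((a.drop s).takeWhile (fun y => y == 0)).length])).length
              from by omega]
          exact hseg
        rw [hfinal]
        rw [ih _ _ (by omega)]
        have hgr1 := groupRuns_drop_run a
          (s + ((a.drop s).takeWhile (fun y => y == 0)).length) he1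
        have hXne : ¬ (a[s + ((a.drop s).takeWhile (fun y => y == 0)).length] : Int) = 0 := by
          intro hc; rw [hc] at hv0; simp at hv0
        by_cases hze : (a.drop s).takeWhile (fun y => y == 0) = []
        · -- no leading zeros: the segment is the bare token run
          have hzl : ((a.drop s).takeWhile (fun y => y == 0)).length = 0 := by
            rw [hze]; rfl
          rw [show groupRuns (a.drop s)
                = groupRuns (a.drop (s + ((a.drop s).takeWhile (fun y => y == 0)).length))
              from by rw [hzl, Nat.add_zero]]
          rw [hgr1]
          rw [pyB_segs_cons_ne ts _ _ (by simpa using hXne)]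
          rw [(congrArg (fun l => l ++ a[s + ((a.drop s).takeWhile (fun y => y == 0)).length]
                :: (a.drop (s + ((a.drop s).takeWhile (fun y => y == 0)).length + 1)).takeWhile
                    (fun y => y == a[s + ((a.drop s).takeWhile (fun y => y == 0)).length])) hze).trans
              (List.nil_append _)]
        · -- a zero run, then the token run: one segment from two runs
          obtain ⟨zh, zt, hzc⟩ := List.exists_cons_of_ne_nil hze
          have hzh0 : zh = 0 := by
            have : (zh == 0) = true :=
              List.mem_takeWhile_imp (p := fun y => y == 0) (l := a.drop s)
                (by rw [hzc]; exact List.mem_cons_self)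
            simpa using this
          have hh : (a.drop s).head? = some 0 := by
            conv_lhs => rw [← List.takeWhile_append_dropWhile
              (p := fun y => y == 0) (l := a.drop s)]
            rw [hzc]
            simp [hzh0]
          have hgr0 : groupRuns (a.drop s)
              = ((a.drop s).takeWhile (fun y => y == 0))
                :: groupRuns (a.drop (s + ((a.drop s).takeWhile (fun y => y == 0)).length)) := by
            rw [groupRuns_cons 0 (a.drop s) hh, hdw]
          rw [hgr0, hgr1]
          rw [pyB_segs_cons0 ts _ _ _ (by rw [hzc]; simp [hzh0])]
    · unfold pyA_outer
      rw [dif_neg h]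
      rw [List.drop_eq_nil_of_le (by omega)]
      simp [groupRuns, pyB_segs]

theorem pyB_segs_ne (acc : List (List Int)) (runs : List (List Int)) :
    acc ≠ [] ∨ runs ≠ [] → pyB_segs acc runs ≠ [] := by
  induction acc, runs using pyB_segs.induct with
  | case1 acc => intro h; simpa [pyB_segs] using h.resolve_right (by simp)
  | case2 acc r hr r2 rest2 ih =>
    intro _
    show pyB_segs acc (r :: r2 :: rest2) ≠ []
    rw [pyB_segs, if_pos hr]
    exact ih (Or.inl (by simp))
  | case3 acc r hr =>
    intro _
    simp only [pyB_segs]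
    split <;> simp
  | case4 acc r rest hr ih =>
    intro _
    cases rest with
    | nil =>
      rw [pyB_segs, if_neg hr]
      exact ih (Or.inl (by simp))
    | cons r2 rest2 =>
      rw [pyB_segs, if_neg hr]
      exact ih (Or.inl (by simp))

theorem merge_eq (mid : List Int) : ∀ (segs : List (List Int)) (acc : List (List Int)), segs ≠ [] →
    (if mid.contains ((PySem.List.max? (segs.getLastD []) (fun x => x)).getD 0) then
       (segs.dropLast.foldl (pyA_step mid) acc).dropLast ++
         [(segs.dropLast.foldl (pyA_step mid) acc).getLastD [] ++ segs.getLastD []]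
     else segs.dropLast.foldl (pyA_step mid) acc ++ [segs.getLastD []])
    = pyB_merge mid acc segs := by
  intro segs
  induction segs with
  | nil => intro acc h; exact absurd rfl h
  | cons seg rest ih =>
    intro acc _
    cases rest with
    | nil => simp [pyB_merge]
    | cons seg2 rest2 =>
      have hres : (seg2 :: rest2 : List (List Int)) ≠ [] := by simp
      have h2 : pyB_merge mid acc (seg :: seg2 :: rest2)
          = pyB_merge mid (pyA_step mid acc seg) (seg2 :: rest2) := by
        rw [pyB_merge]
        · unfold pyA_step
          split <;> rfl
        · simp
      rw [h2, ← ih (pyA_step mid acc seg) hres]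
      simp only [List.dropLast_cons₂, List.foldl_cons, List.getLastD_cons]

-- ===== VERDICT =====
theorem get_frames_timestamp_word_spec : Claim_equal_get_frames_timestamp_word := by
  intro alignment mid_token _ hpre
  unfold Spec_get_frames_timestamp_word
  obtain ⟨⟨x, hx, hx0⟩, _⟩ := hpre
  have hane : alignment ≠ [] := by intro h; subst h; simp at hx
  have houter : pyA_outer alignment 0 0 [] = pyB_segs [] (groupRuns alignment) := by
    have := pyA_outer_eq alignment alignment.length 0 [] (by omega)
    simpa using this
  have hne : pyB_segs [] (groupRuns alignment) ≠ [] := by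
    apply pyB_segs_ne
    right
    cases alignment with
    | nil => exact absurd rfl hane
    | cons y ys => simp [groupRuns]
  simp only [get_frames_timestamp_word, get_frames_timestamp_word_alt, pyB_runs_eq, houter]
  exact merge_eq mid_token (pyB_segs [] (groupRuns alignment)) [] hne
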